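-- pv_equiv track=rewrite | github.com/Yeop-Dong/CodingTest_Study | 프로그래머스/4/17685. ［3차］ 자동완성/［3차］ 자동완성.py | solution
-- ===== SOURCE A (Python) =====
-- def solution(words):
--     t = {"root": (0, {})}
--
--     for word in words:
--         v, c = t["root"]
--         for ch in word:
--             if c.get(ch, None):
--                 nv, nc = c[ch]
--                 c[ch] = (nv + 1, nc)
--                 c = nc
--             else:
--                 c[ch] = (1, {})
--                 c = c[ch][1]
--     answer = 0
--     for word in words:
--         v, c = t["root"]
--         for ch in word:
--             v, c = c[ch]
--             answer += 1
--             if v == 1: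
--                 break
--     return answer
-- ===== SOURCE B (Python) =====
-- def lcp(a, b):
--     k = 0
--     while k < len(a) and k < len(b) and a[k] == b[k]:
--         k += 1
--     return k
--
-- def solution(words):
--     total = 0
--     for i, w in enumerate(words):
--         m = 0
--         for j, u in enumerate(words):
--             if j != i:
--                 m = max(m, lcp(w, u))
--         total += min(len(w), m + 1)
--     return total
-- ===== Notes on version B (the rewrite author's own statement) =====
-- stated objective: simpler
-- what changed: B drops A's mutable counting trie (built with nested dicts, then re-walked per word) and instead computes each word's keystrokes directly as min(len(word), 1 + max LCP with any other word) by pairwise longest-common-prefix comparison.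
import Mathlib
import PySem

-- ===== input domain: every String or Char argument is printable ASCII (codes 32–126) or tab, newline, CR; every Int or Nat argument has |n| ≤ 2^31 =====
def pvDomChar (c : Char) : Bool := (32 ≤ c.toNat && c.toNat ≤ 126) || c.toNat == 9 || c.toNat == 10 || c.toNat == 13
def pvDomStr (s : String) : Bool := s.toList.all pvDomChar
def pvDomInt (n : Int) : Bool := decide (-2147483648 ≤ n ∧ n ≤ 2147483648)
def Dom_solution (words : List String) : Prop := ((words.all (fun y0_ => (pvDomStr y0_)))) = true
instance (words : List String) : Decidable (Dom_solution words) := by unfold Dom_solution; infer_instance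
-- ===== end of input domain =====

-- B replaces A's counting trie by a direct pairwise computation: each word costs
-- min(len(word), 1 + max LCP with any other word); same value, no trie (objective: simpler).

-- ===== PORT A =====
-- trie node list: `cons ch count children siblings`; a Python dict {ch: (count, childdict)}
-- is this list in insertion order (keys distinct by construction)
inductive Trie where
  | nil : Trie
  | cons : Char → Int → Trie → Trie → Trie
deriving DecidableEq, Repr

-- the inner `for ch in word` insertion loop of A's first pass
def insTrie : Trie → List Char → Trie
  | t, [] => t
  | .nil, ch :: rest => .cons ch 1 (insTrie .nil rest) .nil
  | .cons c v sub tl, ch :: rest =>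
      if c = ch then .cons c (v + 1) (insTrie sub rest) tl
      else .cons c v sub (insTrie tl (ch :: rest))
termination_by t w => (w.length, sizeOf t)

-- `c.get(ch, None)` / `c[ch]`
def findTrie : Trie → Char → Option (Int × Trie)
  | .nil, _ => none
  | .cons c v sub tl, ch => if c = ch then some (v, sub) else findTrie tl ch

-- the inner `for ch in word` counting loop of A's second pass (break when v == 1).
-- `none` is unreachable when the word was inserted (Python's c[ch] would raise KeyError).
def queryTrie : Trie → List Char → Int
  | _, [] => 0
  | t, ch :: rest =>
      match findTrie t ch with
      | none => 0
      | some (v, sub) => 1 + (if v = 1 then 0 else queryTrie sub rest)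

def solution (words : List String) : Int :=
  let t := words.foldl (fun acc w => insTrie acc w.toList) .nil
  words.foldl (fun ans w => ans + queryTrie t w.toList) 0

-- ===== PORT B =====
-- Source B's lcp: longest common prefix length of two strings
def lcpB : List Char → List Char → Int
  | a :: as, b :: bs => if a = b then 1 + lcpB as bs else 0
  | _, _ => 0

def solution_alt (words : List String) : Int :=
  (PySem.List.enumerate words).foldl
    (fun total p =>
      let m := (PySem.List.enumerate words).foldl
        (fun m q => if q.1 ≠ p.1 then max m (lcpB p.2.toList q.2.toList) else m) 0
      total + min (PySem.Str.len p.2) (m + 1)) 0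

-- ===== PRECONDITION & SPEC =====
def Spec_solution (words : List String) (out : Int) : Prop := out = solution_alt words
instance (words : List String) (out : Int) : Decidable (Spec_solution words out) := by unfold Spec_solution; infer_instance

-- ===== CLAIM (what is proved, stated in full; the proofs are below) =====
def Claim_equal_solution : Prop := ∀ (words : List String), Dom_solution words → Spec_solution words (solution words)

-- ===== LEMMAS AND PROOFS =====

-- count at the node reached by path ch :: p (none = node absent)
def pathCnt? : Trie → Char → List Char → Option Int
  | t, ch, p =>
      match findTrie t ch with
      | none => none
      | some (v, sub) =>
        match p with
        | [] => some v
        | ch2 :: p2 => pathCnt? sub ch2 p2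

-- number of words having p as a prefix
def cntp (words : List String) (p : List Char) : Nat :=
  words.countP (fun w => p.isPrefixOf w.toList)

lemma pathCnt?_nil (ch : Char) (p : List Char) : pathCnt? .nil ch p = none := by
  simp [pathCnt?, findTrie]

lemma pathCnt?_def (t : Trie) (ch : Char) (p : List Char) :
    pathCnt? t ch p =
      match findTrie t ch with
      | none => none
      | some (v, sub) =>
        match p with
        | [] => some v
        | ch2 :: p2 => pathCnt? sub ch2 p2 := by
  rw [pathCnt?]

lemma pathCnt?_none (t : Trie) (ch : Char) (p : List Char) (h : findTrie t ch = none) :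
    pathCnt? t ch p = none := by
  rw [pathCnt?_def, h]

lemma pathCnt?_some_nil (t : Trie) (ch : Char) (v : Int) (sub : Trie)
    (h : findTrie t ch = some (v, sub)) : pathCnt? t ch [] = some v := by
  rw [pathCnt?_def, h]

lemma pathCnt?_some_cons (t : Trie) (ch : Char) (v : Int) (sub : Trie) (ch2 : Char)
    (p2 : List Char) (h : findTrie t ch = some (v, sub)) :
    pathCnt? t ch (ch2 :: p2) = pathCnt? sub ch2 p2 := by
  rw [pathCnt?_def, h]

lemma pathCnt?_congr (t1 t2 : Trie) (ch : Char) (p : List Char)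
    (h : findTrie t1 ch = findTrie t2 ch) : pathCnt? t1 ch p = pathCnt? t2 ch p := by
  rw [pathCnt?_def, pathCnt?_def, h]

lemma pathCnt?_ins (t : Trie) (w : List Char) (ch : Char) (p : List Char) :
    pathCnt? (insTrie t w) ch p =
      if (ch :: p).isPrefixOf w then some ((pathCnt? t ch p).getD 0 + 1)
      else pathCnt? t ch p := by
  have hnil : ∀ (ch : Char) (p : List Char), pathCnt? Trie.nil ch p = none :=
    fun ch p => pathCnt?_none _ _ _ rfl
  induction t, w using insTrie.induct generalizing ch p with
  | case1 t => simp [insTrie, List.isPrefixOf]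
  | case2 wc rest ih =>
    by_cases hcw : ch = wc
    · subst hcw
      have hf : findTrie (Trie.cons ch 1 (insTrie Trie.nil rest) Trie.nil) ch =
          some (1, insTrie Trie.nil rest) := by simp [findTrie]
      cases p with
      | nil =>
        rw [insTrie, pathCnt?_some_nil _ _ _ _ hf]
        simp [List.isPrefixOf, hnil]
      | cons ch2 p2 =>
        rw [insTrie, pathCnt?_some_cons _ _ _ _ _ _ hf, ih ch2 p2]
        simp [List.isPrefixOf, hnil]
    · have hwc : ¬ wc = ch := fun h => hcw h.symm
      have hf : findTrie (Trie.cons wc 1 (insTrie Trie.nil rest) Trie.nil) ch = none := by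
        simp [findTrie, hwc]
      rw [insTrie, pathCnt?_none _ _ _ hf]
      have : ((ch :: p).isPrefixOf (wc :: rest)) = false := by
        simp [List.isPrefixOf]; intro h; exact absurd h hcw
      simp [this, hnil]
  | case3 v sub tl wc rest ih =>
    by_cases hcw : ch = wc
    · subst hcw
      have hf : findTrie (Trie.cons ch (v + 1) (insTrie sub rest) tl) ch =
          some (v + 1, insTrie sub rest) := by simp [findTrie]
      have hf0 : findTrie (Trie.cons ch v sub tl) ch = some (v, sub) := by simp [findTrie]
      cases p with
      | nil =>
        rw [insTrie, if_pos rfl, pathCnt?_some_nil _ _ _ _ hf,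
          pathCnt?_some_nil _ _ _ _ hf0]
        simp [List.isPrefixOf]
      | cons ch2 p2 =>
        rw [insTrie, if_pos rfl, pathCnt?_some_cons _ _ _ _ _ _ hf, ih ch2 p2,
          pathCnt?_some_cons _ _ _ _ _ _ hf0]
        simp only [List.isPrefixOf, BEq.rfl, Bool.true_and]
    · have hwc : ¬ wc = ch := fun h => hcw h.symm
      have hf : findTrie (Trie.cons wc (v + 1) (insTrie sub rest) tl) ch = findTrie tl ch := by
        simp [findTrie, hwc]
      have hf0 : findTrie (Trie.cons wc v sub tl) ch = findTrie tl ch := by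
        simp [findTrie, hwc]
      rw [insTrie, if_pos rfl, pathCnt?_congr _ tl ch p hf]
      have : ((ch :: p).isPrefixOf (wc :: rest)) = false := by
        simp [List.isPrefixOf]; intro h; exact absurd h hcw
      rw [this]
      simp only [Bool.false_eq_true, if_false]
      exact (pathCnt?_congr _ tl ch p hf0).symm
  | case4 c v sub tl wc rest hc ih =>
    have hpre : ((ch :: p).isPrefixOf (wc :: rest)) = true → ch = wc := by
      simp [List.isPrefixOf]; intro h _; exact h
    by_cases hcc : ch = c
    · subst hcc
      have hf : findTrie (Trie.cons ch v sub (insTrie tl (wc :: rest))) ch =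
          findTrie (Trie.cons ch v sub tl) ch := by simp [findTrie]
      rw [insTrie, if_neg hc, pathCnt?_congr _ (Trie.cons ch v sub tl) ch p hf]
      have : ((ch :: p).isPrefixOf (wc :: rest)) = false := by
        cases hpf : ((ch :: p).isPrefixOf (wc :: rest)) with
        | false => rfl
        | true => exact absurd (hpre hpf) hc
      simp [this]
    · have hcc' : ¬ c = ch := fun h => hcc h.symm
      have hf : findTrie (Trie.cons c v sub (insTrie tl (wc :: rest))) ch =
          findTrie (insTrie tl (wc :: rest)) ch := by
        simp [findTrie, hcc']
      have hf0 : findTrie (Trie.cons c v sub tl) ch = findTrie tl ch := by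
        simp [findTrie, hcc']
      rw [insTrie, if_neg hc, pathCnt?_congr _ (insTrie tl (wc :: rest)) ch p hf,
        ih ch p, pathCnt?_congr _ tl ch p hf0]

lemma pathCnt?_foldl (ws : List String) (t : Trie) (ch : Char) (p : List Char) :
    pathCnt? (ws.foldl (fun acc w => insTrie acc w.toList) t) ch p =
      if cntp ws (ch :: p) = 0 then pathCnt? t ch p
      else some ((pathCnt? t ch p).getD 0 + cntp ws (ch :: p)) := by
  induction ws generalizing t with
  | nil => simp [cntp]
  | cons w ws ih =>
    simp only [List.foldl_cons]
    rw [ih]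
    have hcons : cntp (w :: ws) (ch :: p) =
        cntp ws (ch :: p) + if (ch :: p).isPrefixOf w.toList then 1 else 0 := by
      simp [cntp, List.countP_cons]
    rw [pathCnt?_ins]
    by_cases hw : (ch :: p).isPrefixOf w.toList
    · simp only [if_pos hw] at *
      by_cases hz : cntp ws (ch :: p) = 0
      · simp [hcons, hz]
      · simp only [hcons, if_neg hz, Option.getD_some]
        have : ¬ (cntp ws (ch :: p) + 1 = 0) := by omega
        simp only [if_neg this]
        congr 1
        push_cast
        ring
    · simp only [if_neg hw] at *
      simp [hcons]

-- the count-indexed specification of A's query loop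
def qspec (words : List String) (pre : List Char) : List Char → Int
  | [] => 0
  | ch :: rest =>
      if cntp words (pre ++ [ch]) = 0 then 0
      else 1 + (if cntp words (pre ++ [ch]) = 1 then 0 else qspec words (pre ++ [ch]) rest)

lemma query_eq_qspec (words : List String) :
    ∀ (wcs : List Char) (t : Trie) (pre : List Char),
      (∀ ch p, pathCnt? t ch p =
        if cntp words (pre ++ ch :: p) = 0 then none
        else some ((cntp words (pre ++ ch :: p) : Int))) →
      queryTrie t wcs = qspec words pre wcs := by
  intro wcs
  induction wcs with
  | nil => intro t pre H; simp [queryTrie, qspec]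
  | cons ch rest ih =>
    intro t pre H
    have h0 := H ch []
    simp only [queryTrie, qspec]
    cases hf : findTrie t ch with
    | none =>
      have hp0 : pathCnt? t ch [] = none := pathCnt?_none _ _ _ hf
      rw [hp0] at h0
      by_cases hz : cntp words (pre ++ [ch]) = 0
      · simp [hz]
      · rw [if_neg (by simpa using hz)] at h0; exact absurd h0 (by simp)
    | some vs =>
      obtain ⟨v, sub⟩ := vs
      have hp0 : pathCnt? t ch [] = some v := pathCnt?_some_nil _ _ _ _ hf
      rw [hp0] at h0
      by_cases hz : cntp words (pre ++ [ch]) = 0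
      · rw [if_pos (by simpa using hz)] at h0; exact absurd h0 (by simp)
      · rw [if_neg (by simpa using hz)] at h0
        have hv : v = (cntp words (pre ++ [ch]) : Int) := by
          simpa using h0
        rw [if_neg hz]
        by_cases h1 : cntp words (pre ++ [ch]) = 1
        · have : v = 1 := by rw [hv, h1]; rfl
          simp [this, h1]
        · have hv1 : ¬ (v = 1) := by
            rw [hv]; intro hh
            have : (cntp words (pre ++ [ch]) : Int) = (1 : Int) := hh
            exact h1 (by exact_mod_cast this)
          have hrec : queryTrie sub rest = qspec words (pre ++ [ch]) rest := by
            apply ih sub (pre ++ [ch])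
            intro ch2 p2
            have hH := H ch (ch2 :: p2)
            rw [pathCnt?_some_cons _ _ _ _ _ _ hf] at hH
            rw [hH]
            simp
          simp [hv1, h1, hrec]

-- length of the longest prefix of wcs (after pre) shared with a second word
def gval (words : List String) (pre : List Char) : List Char → Int
  | [] => 0
  | ch :: rest =>
      if 2 ≤ cntp words (pre ++ [ch]) then 1 + gval words (pre ++ [ch]) rest else 0

lemma gval_nonneg (words : List String) : ∀ wcs pre, 0 ≤ gval words pre wcs := by
  intro wcs
  induction wcs with
  | nil => intro pre; simp [gval]
  | cons ch rest ih =>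
    intro pre
    simp only [gval]
    split
    · have := ih (pre ++ [ch]); omega
    · omega

lemma gval_le_len (words : List String) : ∀ wcs pre, gval words pre wcs ≤ wcs.length := by
  intro wcs
  induction wcs with
  | nil => intro pre; simp [gval]
  | cons ch rest ih =>
    intro pre
    simp only [gval, List.length_cons]
    split
    · have := ih (pre ++ [ch]); push_cast; omega
    · push_cast; omega

lemma qspec_eq_min (words : List String) :
    ∀ (wcs : List Char) (pre : List Char),
      (∀ k : Nat, 1 ≤ k → k ≤ wcs.length → 1 ≤ cntp words (pre ++ wcs.take k)) →
      qspec words pre wcs = min (wcs.length : Int) (gval words pre wcs + 1) := by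
  intro wcs
  induction wcs with
  | nil => intro pre H; simp [qspec, gval]
  | cons ch rest ih =>
    intro pre H
    have h1 : 1 ≤ cntp words (pre ++ [ch]) := by
      have := H 1 (le_refl 1) (by simp)
      simpa using this
    simp only [qspec, gval]
    rw [if_neg (by omega)]
    by_cases h2 : 2 ≤ cntp words (pre ++ [ch])
    · rw [if_neg (by omega), if_pos h2]
      rw [ih (pre ++ [ch])]
      · have hg := gval_nonneg words rest (pre ++ [ch])
        have hl := gval_le_len words rest (pre ++ [ch])
        simp only [List.length_cons]
        push_cast
        omega
      · intro k hk hkle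
        have := H (k + 1) (by omega) (by simpa using hkle)
        simpa [List.take_succ_cons, List.append_assoc] using this
    · have : cntp words (pre ++ [ch]) = 1 := by omega
      rw [if_pos this, if_neg h2]
      have : 1 ≤ rest.length + 1 := by omega
      simp only [List.length_cons]
      push_cast
      omega

lemma gval_take (words : List String) :
    ∀ (wcs pre : List Char) (k : Nat), 1 ≤ k → (k : Int) ≤ gval words pre wcs →
      2 ≤ cntp words (pre ++ wcs.take k) := by
  intro wcs
  induction wcs with
  | nil => intro pre k hk hle; simp [gval] at hle; omega
  | cons ch rest ih =>
    intro pre k hk hle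
    simp only [gval] at hle
    by_cases h2 : 2 ≤ cntp words (pre ++ [ch])
    · rw [if_pos h2] at hle
      cases k with
      | zero => omega
      | succ k' =>
        cases Nat.eq_zero_or_pos k' with
        | inl h0 => subst h0; simpa using h2
        | inr hpos =>
          have hk' : (k' : Int) ≤ gval words (pre ++ [ch]) rest := by push_cast at hle ⊢; omega
          have := ih (pre ++ [ch]) k' hpos hk'
          simpa [List.take_succ_cons, List.append_assoc] using this
    · rw [if_neg h2] at hle; omega

lemma gval_ge (words : List String) :
    ∀ (wcs pre : List Char) (K : Nat), K ≤ wcs.length →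
      (∀ k : Nat, 1 ≤ k → k ≤ K → 2 ≤ cntp words (pre ++ wcs.take k)) →
      (K : Int) ≤ gval words pre wcs := by
  intro wcs
  induction wcs with
  | nil => intro pre K hK H; simp at hK; subst hK; simp [gval]
  | cons ch rest ih =>
    intro pre K hK H
    cases K with
    | zero => have := gval_nonneg words (ch :: rest) pre; simpa using this
    | succ K' =>
      have h1 : 2 ≤ cntp words (pre ++ [ch]) := by
        have := H 1 (le_refl 1) (by omega)
        simpa using this
      simp only [gval, if_pos h1]
      have : (K' : Int) ≤ gval words (pre ++ [ch]) rest := by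
        apply ih (pre ++ [ch]) K' (by simpa using hK)
        intro k hk hkle
        have := H (k + 1) (by omega) (by omega)
        simpa [List.take_succ_cons, List.append_assoc] using this
      push_cast
      omega

lemma lcpB_nonneg : ∀ a b, 0 ≤ lcpB a b := by
  intro a
  induction a with
  | nil => intro b; cases b <;> simp [lcpB]
  | cons x as ih =>
    intro b
    cases b with
    | nil => simp [lcpB]
    | cons y bs =>
      simp only [lcpB]
      split
      · have := ih bs; omega
      · omega

lemma lcpB_le_len : ∀ a b, lcpB a b ≤ a.length := by
  intro a
  induction a with
  | nil => intro b; cases b <;> simp [lcpB]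
  | cons x as ih =>
    intro b
    cases b with
    | nil => simp [lcpB]; omega
    | cons y bs =>
      simp only [lcpB, List.length_cons]
      split
      · have := ih bs; push_cast; omega
      · push_cast; omega

lemma take_prefixOf_iff_lcp : ∀ (a : List Char) (k : Nat) (b : List Char), k ≤ a.length →
    ((a.take k).isPrefixOf b ↔ (k : Int) ≤ lcpB a b) := by
  intro a
  induction a with
  | nil =>
    intro k b hk
    simp at hk; subst hk
    simp
    cases b <;> simp [lcpB]
  | cons x as ih =>
    intro k b hk
    cases k with
    | zero =>
      simp
      exact lcpB_nonneg _ _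
    | succ k' =>
      cases b with
      | nil =>
        simp only [List.take_succ_cons, List.isPrefixOf_iff_prefix, List.prefix_nil, lcpB]
        constructor
        · intro h; exact absurd h (by simp)
        · intro h; exfalso; omega
      | cons y bs =>
        by_cases hxy : x = y
        · subst hxy
          simp only [List.take_succ_cons, List.isPrefixOf_iff_prefix, List.cons_prefix_cons,
            true_and, lcpB]
          rw [← List.isPrefixOf_iff_prefix]
          rw [ih k' bs (by simpa using hk)]
          push_cast
          omega
        · simp only [List.take_succ_cons, List.isPrefixOf_iff_prefix, List.cons_prefix_cons,
            lcpB, if_neg hxy]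
          constructor
          · intro h; exact absurd h.1 hxy
          · intro h; exfalso; omega

-- fold-max characterisation (generic over the filtered fold in solution_alt)
lemma le_foldl_max_init {α : Type} (P : α → Prop) [DecidablePred P] (f : α → Int) :
    ∀ (l : List α) (a : Int), a ≤ l.foldl (fun m q => if P q then max m (f q) else m) a := by
  intro l
  induction l with
  | nil => intro a; simp
  | cons y l ih =>
    intro a
    simp only [List.foldl_cons]
    refine le_trans ?_ (ih _)
    split <;> simp

lemma foldl_max_le {α : Type} (P : α → Prop) [DecidablePred P] (f : α → Int) :
    ∀ (l : List α) (a : Int) (x : α), x ∈ l → P x → f x ≤ l.foldl (fun m q => if P q then max m (f q) else m) a := by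
  intro l
  induction l with
  | nil => intro a x hx; simp at hx
  | cons y l ih =>
    intro a x hx hP
    simp only [List.foldl_cons]
    rcases List.mem_cons.mp hx with h | h
    · subst h
      refine le_trans ?_ (le_foldl_max_init P f l _)
      simp [hP]
    · exact ih _ x h hP

lemma foldl_max_cases {α : Type} (P : α → Prop) [DecidablePred P] (f : α → Int) :
    ∀ (l : List α) (a : Int),
      l.foldl (fun m q => if P q then max m (f q) else m) a = a ∨
      ∃ x ∈ l, P x ∧ l.foldl (fun m q => if P q then max m (f q) else m) a = f x := by
  intro l
  induction l with
  | nil => intro a; left; rfl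
  | cons y l ih =>
    intro a
    simp only [List.foldl_cons]
    by_cases hP : P y
    · rw [if_pos hP]
      rcases ih (max a (f y)) with h | ⟨x, hx, hPx, hfx⟩
      · rcases max_cases a (f y) with ⟨hm, _⟩ | ⟨hm, _⟩
        · left; rw [h, hm]
        · right; exact ⟨y, List.mem_cons_self, hP, by rw [h, hm]⟩
      · right; exact ⟨x, List.mem_cons_of_mem y hx, hPx, hfx⟩
    · rw [if_neg hP]
      rcases ih a with h | ⟨x, hx, hPx, hfx⟩
      · left; exact h
      · right; exact ⟨x, List.mem_cons_of_mem y hx, hPx, hfx⟩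

lemma cnt_two_iff (words : List String) (i : Int) (w : String)
    (hmem : (i, w) ∈ PySem.List.enumerate words) (p : List Char)
    (hp : p.isPrefixOf w.toList) :
    2 ≤ cntp words p ↔
      ∃ q ∈ PySem.List.enumerate words, q.1 ≠ i ∧ p.isPrefixOf q.2.toList := by
  have hcnt : cntp words p =
      (PySem.List.enumerate words).countP (fun q => p.isPrefixOf q.2.toList) := by
    unfold cntp
    conv_lhs => rw [← PySem.List.map_snd_enumerate words 0]
    rw [List.countP_map]
    rfl
  have hfst : ((PySem.List.enumerate words).map (fun q => q.1)).Nodup := by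
    rw [PySem.List.map_fst_enumerate]
    exact PySem.List.nodup_pyRange_one _ _
  have hnd : (PySem.List.enumerate words).Nodup := List.Nodup.of_map _ hfst
  constructor
  · intro h2
    rw [hcnt, List.countP_eq_length_filter] at h2
    have hfn : ((PySem.List.enumerate words).filter
        (fun q => p.isPrefixOf q.2.toList)).Nodup := hnd.filter _
    rcases hfl : (PySem.List.enumerate words).filter (fun q => p.isPrefixOf q.2.toList) with
      _ | ⟨x, _ | ⟨y, rest⟩⟩
    · rw [hfl] at h2; simp at h2
    · rw [hfl] at h2; simp at h2
    · have hx : x ∈ (PySem.List.enumerate words).filter (fun q => p.isPrefixOf q.2.toList) := by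
        rw [hfl]; exact List.mem_cons_self
      have hy : y ∈ (PySem.List.enumerate words).filter (fun q => p.isPrefixOf q.2.toList) := by
        rw [hfl]; simp
      rw [hfl] at hfn
      have hxy : x ≠ y := by
        intro he
        have := (List.nodup_cons.mp hfn).1
        exact this (he ▸ List.mem_cons_self)
      obtain ⟨hxl, hgx⟩ := List.mem_filter.mp hx
      obtain ⟨hyl, hgy⟩ := List.mem_filter.mp hy
      by_cases hxi : x.1 = i
      · have hyi : y.1 ≠ i := by
          intro h
          exact hxy (List.inj_on_of_nodup_map hfst hxl hyl (by rw [hxi, h]))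
        exact ⟨y, hyl, hyi, hgy⟩
      · exact ⟨x, hxl, hxi, hgx⟩
  · rintro ⟨q, hql, hqi, hqp⟩
    rw [hcnt, List.countP_eq_length_filter]
    have hq : q ∈ (PySem.List.enumerate words).filter (fun q => p.isPrefixOf q.2.toList) :=
      List.mem_filter.mpr ⟨hql, hqp⟩
    have hw : (i, w) ∈ (PySem.List.enumerate words).filter (fun q => p.isPrefixOf q.2.toList) :=
      List.mem_filter.mpr ⟨hmem, hp⟩
    have hne : q ≠ (i, w) := fun he => hqi (by rw [he])
    calc 2 ≤ ((PySem.List.enumerate words).filter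
          (fun q => p.isPrefixOf q.2.toList)).toFinset.card :=
            Finset.one_lt_card.mpr
              ⟨q, List.mem_toFinset.mpr hq, (i, w), List.mem_toFinset.mpr hw, hne⟩
      _ ≤ _ := List.toFinset_card_le _

-- per-word equality
lemma perWord (words : List String) (i : Int) (w : String)
    (hmem : (i, w) ∈ PySem.List.enumerate words) :
    queryTrie (words.foldl (fun acc w => insTrie acc w.toList) .nil) w.toList =
      min (PySem.Str.len w)
        ((PySem.List.enumerate words).foldl
          (fun m q => if q.1 ≠ i then max m (lcpB w.toList q.2.toList) else m) 0 + 1) := by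
  have H : ∀ (ch : Char) (p : List Char),
      pathCnt? (words.foldl (fun acc w => insTrie acc w.toList) Trie.nil) ch p =
        if cntp words ([] ++ ch :: p) = 0 then none
        else some ((cntp words ([] ++ ch :: p) : Int)) := by
    intro ch p
    rw [pathCnt?_foldl, pathCnt?_nil]
    split <;> simp_all
  have hw : w ∈ words := by
    have hm : (fun q : Int × String => q.2) (i, w) ∈
        (PySem.List.enumerate words).map (fun q => q.2) := List.mem_map_of_mem hmem
    rwa [PySem.List.map_snd_enumerate] at hm
  have hwtake : ∀ k : Nat, (w.toList.take k).isPrefixOf w.toList := by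
    intro k
    simp [List.isPrefixOf_iff_prefix, List.take_prefix]
  have hown : ∀ k : Nat, 1 ≤ k → k ≤ w.toList.length →
      1 ≤ cntp words ([] ++ w.toList.take k) := by
    intro k _ _
    have hmemf : w ∈ words.filter (fun u => (w.toList.take k).isPrefixOf u.toList) :=
      List.mem_filter.mpr ⟨hw, hwtake k⟩
    have := List.length_pos_of_mem hmemf
    simp only [List.nil_append, cntp, List.countP_eq_length_filter]
    omega
  have hq : queryTrie (words.foldl (fun acc w => insTrie acc w.toList) Trie.nil) w.toList =
      qspec words [] w.toList := query_eq_qspec words w.toList _ [] H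
  have hqs := qspec_eq_min words w.toList [] hown
  have hg1 : gval words [] w.toList ≤
      (PySem.List.enumerate words).foldl
        (fun m q => if q.1 ≠ i then max m (lcpB w.toList q.2.toList) else m) 0 := by
    by_cases hg0 : gval words [] w.toList ≤ 0
    · exact le_trans hg0 (le_foldl_max_init _ _ _ 0)
    · replace hg0 : 0 < gval words [] w.toList := by omega
      set G := gval words [] w.toList with hG
      have hGlen : G ≤ w.toList.length := gval_le_len words w.toList []
      have h2 : 2 ≤ cntp words ([] ++ w.toList.take G.toNat) :=
        gval_take words w.toList [] G.toNat (by omega) (by rw [Int.toNat_of_nonneg (by omega)])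
      rw [List.nil_append] at h2
      obtain ⟨q, hql, hqi, hqp⟩ :=
        (cnt_two_iff words i w hmem (w.toList.take G.toNat) (hwtake G.toNat)).mp h2
      have hlcp : (G.toNat : Int) ≤ lcpB w.toList q.2.toList :=
        (take_prefixOf_iff_lcp w.toList G.toNat q.2.toList (by omega)).mp hqp
      have hle : lcpB w.toList q.2.toList ≤
          (PySem.List.enumerate words).foldl
            (fun m q => if q.1 ≠ i then max m (lcpB w.toList q.2.toList) else m) 0 :=
        foldl_max_le _ _ _ 0 q hql hqi
      have : (G.toNat : Int) = G := Int.toNat_of_nonneg (by omega)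
      omega
  have hg2 : (PySem.List.enumerate words).foldl
        (fun m q => if q.1 ≠ i then max m (lcpB w.toList q.2.toList) else m) 0 ≤
      gval words [] w.toList := by
    have hcases : (PySem.List.enumerate words).foldl
          (fun m q => if q.1 ≠ i then max m (lcpB w.toList q.2.toList) else m) 0 = 0 ∨
        ∃ x ∈ PySem.List.enumerate words, x.1 ≠ i ∧
          (PySem.List.enumerate words).foldl
            (fun m q => if q.1 ≠ i then max m (lcpB w.toList q.2.toList) else m) 0 =
            lcpB w.toList x.2.toList :=
      foldl_max_cases _ _ _ 0
    rcases hcases with h0 | ⟨x, hx, hPx, hfx⟩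
    · rw [h0]; exact gval_nonneg words w.toList []
    · rw [hfx]
      have hnn : 0 ≤ lcpB w.toList x.2.toList := lcpB_nonneg _ _
      have hlen : lcpB w.toList x.2.toList ≤ w.toList.length := lcpB_le_len _ _
      have hcast : ((lcpB w.toList x.2.toList).toNat : Int) = lcpB w.toList x.2.toList :=
        Int.toNat_of_nonneg hnn
      have hge := gval_ge words w.toList [] (lcpB w.toList x.2.toList).toNat (by omega) ?_
      · omega
      · intro k hk hkK
        have hkw : (k : Int) ≤ w.toList.length := by omega
        have hkl : (k : Int) ≤ lcpB w.toList x.2.toList := by omega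
        have hpref : (w.toList.take k).isPrefixOf x.2.toList :=
          (take_prefixOf_iff_lcp w.toList k x.2.toList (by omega)).mpr hkl
        have := (cnt_two_iff words i w hmem (w.toList.take k) (hwtake k)).mpr ⟨x, hx, hPx, hpref⟩
        simpa using this
  rw [hq, hqs, PySem.Str.len_eq]
  have : gval words [] w.toList =
      (PySem.List.enumerate words).foldl
        (fun m q => if q.1 ≠ i then max m (lcpB w.toList q.2.toList) else m) 0 :=
    le_antisymm hg1 hg2
  rw [this]

-- ===== VERDICT (by name: the statement is the Claim_ definition above) =====
theorem solution_spec : Claim_equal_solution := by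
  unfold Claim_equal_solution Spec_solution
  intro words _
  have hA : solution words =
      0 + (words.map (fun w =>
        queryTrie (words.foldl (fun acc w => insTrie acc w.toList) Trie.nil) w.toList)).sum :=
    PySem.List.foldl_add words _ 0
  have hB : solution_alt words =
      0 + ((PySem.List.enumerate words).map (fun p => min (PySem.Str.len p.2)
        ((PySem.List.enumerate words).foldl
          (fun m q => if q.1 ≠ p.1 then max m (lcpB p.2.toList q.2.toList) else m) 0 + 1))).sum :=
    PySem.List.foldl_add (PySem.List.enumerate words) _ 0
  rw [hA, hB]
  congr 1
  set t := words.foldl (fun acc w => insTrie acc w.toList) Trie.nil with ht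
  have hmap : words.map (fun w => queryTrie t w.toList)
      = (PySem.List.enumerate words).map (fun p => queryTrie t p.2.toList) := by
    conv_lhs => rw [← PySem.List.map_snd_enumerate words 0]
    rw [List.map_map]
    rfl
  rw [hmap]
  apply congrArg
  apply List.map_congr_left
  intro p hp
  obtain ⟨i, w⟩ := p
  simpa [← ht] using perWord words i w hp
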